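-- pv_equiv track=rewrite | github.com/inayet/openapi30_to_openapi31 | src/md_content_aggregator.py | escape_markdown_characters_in_python_code
-- ===== SOURCE A (Python) =====
-- def escape_markdown_characters_in_python_code(code: str) -> str:
--     """Escape markdown special characters within Python code."""
--     lines = code.split('\n')
--     escaped_lines = []
--     for line in lines:
--         if line.strip().startswith("#"):
--             line = line.replace("#", r"\#")
--             line = line.replace("*", r"\*")
--             line = line.replace("_", r"\_")
--             line = line.replace("[", r"\[")
--             line = line.replace("]", r"\]")
--             line = line.replace("(", r"\(")
--             line = line.replace(")", r"\)")
--             line = line.replace(">", r"\>")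
--             line = line.replace("-", r"\-")
--         escaped_lines.append(line)
--     return '\n'.join(escaped_lines)
-- ===== SOURCE B (Python) =====
-- ESC = set('#*_[]()>-')
--
--
-- def escape_markdown_characters_in_python_code(code: str) -> str:
--     """Escape markdown special characters within Python code."""
--     out = []
--     i, n = 0, len(code)
--     while i < n:
--         # at a line start: look ahead past leading whitespace to see if the line is a comment
--         j = i
--         while j < n and code[j] != '\n' and code[j].isspace():
--             j += 1
--         comment = j < n and code[j] == '#'
--         # emit the line character by character, escaping if it is a comment line
--         while i < n and code[i] != '\n':
--             c = code[i]
--             if comment and c in ESC: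
--                 out.append('\\')
--             out.append(c)
--             i += 1
--         if i < n:
--             out.append('\n')
--             i += 1
--     return ''.join(out)
-- ===== Notes on version B (the rewrite author's own statement) =====
-- stated objective: alternative
-- what changed: Replaced A's three-stage pipeline (split into lines, nine whole-line .replace passes per comment line, join) with a single streaming character-level state machine over the raw string: at each line start it looks ahead past leading whitespace to classify the line, then emits characters one by one, inserting a backslash before specials on comment lines; no split, join or replace.
import Mathlib
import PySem

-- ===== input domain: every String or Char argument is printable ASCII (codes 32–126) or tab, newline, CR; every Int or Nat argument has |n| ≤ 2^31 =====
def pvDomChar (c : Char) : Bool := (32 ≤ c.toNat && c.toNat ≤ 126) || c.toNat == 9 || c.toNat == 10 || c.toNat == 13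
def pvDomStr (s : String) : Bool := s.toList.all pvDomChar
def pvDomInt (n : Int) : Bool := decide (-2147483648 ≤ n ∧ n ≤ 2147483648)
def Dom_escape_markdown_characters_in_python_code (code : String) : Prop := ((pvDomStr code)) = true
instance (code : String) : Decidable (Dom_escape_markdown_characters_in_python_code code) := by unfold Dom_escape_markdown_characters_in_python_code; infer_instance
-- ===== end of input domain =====

-- B replaces A's split/nine-replace/join pipeline by a single streaming character-level
-- state machine over the raw string (alternative decomposition); same return value.

-- ===== PORT A =====
-- the nine sequential replace calls inside the guard of A's loop
def pvEscLineA (line : List Char) : List Char :=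
  let line := PySem.Chars.replace line ['#'] ['\\', '#']
  let line := PySem.Chars.replace line ['*'] ['\\', '*']
  let line := PySem.Chars.replace line ['_'] ['\\', '_']
  let line := PySem.Chars.replace line ['['] ['\\', '[']
  let line := PySem.Chars.replace line [']'] ['\\', ']']
  let line := PySem.Chars.replace line ['('] ['\\', '(']
  let line := PySem.Chars.replace line [')'] ['\\', ')']
  let line := PySem.Chars.replace line ['>'] ['\\', '>']
  PySem.Chars.replace line ['-'] ['\\', '-']

def escape_markdown_characters_in_python_code (code : String) : String :=
  let lines := PySem.Chars.splitOn code.toList ['\n']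
  let escaped_lines := lines.foldl (fun acc line =>
    acc ++ [if PySem.Chars.startswith (PySem.Chars.strip line) ['#']
            then pvEscLineA line else line]) []
  String.ofList (PySem.Chars.join ['\n'] escaped_lines)

-- ===== PORT B =====
-- ESC = set('#*_[]()>-') : membership test
def pvIsEsc (c : Char) : Bool := c ∈ PySem.Set.ofList ['#', '*', '_', '[', ']', '(', ')', '>', '-']

-- the inner lookahead loop: while j < n and code[j] != '\n' and code[j].isspace(); comment = j < n and code[j] == '#'
def pvIsComment : List Char → Bool
  | [] => false
  | c :: t => if c ≠ '\n' ∧ PySem.Chars.isspace c then pvIsComment t else c = '#'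

-- the outer while loop of B (one step per line start) and its inner emit loop
mutual
def pvGoB : List Char → List Char
  | [] => []
  | c :: t => pvEmitB (pvIsComment (c :: t)) (c :: t)
  termination_by l => (l.length, 1)
def pvEmitB (comment : Bool) : List Char → List Char
  | [] => []
  | c :: t =>
      if c = '\n' then '\n' :: pvGoB t
      else (if comment && pvIsEsc c then ['\\', c] else [c]) ++ pvEmitB comment t
  termination_by l => (l.length, 0)
end

def escape_markdown_characters_in_python_code_alt (code : String) : String :=
  String.ofList (pvGoB code.toList)

-- ===== PRECONDITION & SPEC =====
def Spec_escape_markdown_characters_in_python_code (code : String) (out : String) : Prop := out = escape_markdown_characters_in_python_code_alt code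
instance (code : String) (out : String) : Decidable (Spec_escape_markdown_characters_in_python_code code out) := by unfold Spec_escape_markdown_characters_in_python_code; infer_instance

-- ===== CLAIM (what is proved, stated in full; the proofs are below) =====
def Claim_equal_escape_markdown_characters_in_python_code : Prop := ∀ (code : String), Dom_escape_markdown_characters_in_python_code code → Spec_escape_markdown_characters_in_python_code code (escape_markdown_characters_in_python_code code)

-- ===== LEMMAS AND PROOFS =====

-- A's per-line transform, named
def pvLineA (line : List Char) : List Char :=
  if PySem.Chars.startswith (PySem.Chars.strip line) ['#'] then pvEscLineA line else line

-- functional model of splitOn with single separator '\n'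
def pvSplit (pre : List Char) : List Char → List (List Char)
  | [] => [pre]
  | c :: t => if c = '\n' then pre :: pvSplit [] t else pvSplit (pre ++ [c]) t

-- a single-character replace is a per-character substitution
def pvSubst (o : Char) (new : List Char) (c : Char) : List Char := if c = o then new else [c]

theorem pv_go_single (o : Char) (new : List Char) : ∀ (l acc : List Char),
    PySem.Chars.replace.go [o] new l.length l acc = acc.reverse ++ l.flatMap (pvSubst o new) := by
  intro l
  induction l with
  | nil => intro acc; simp [PySem.Chars.replace.go]
  | cons c t ih =>
    intro acc
    rw [List.length_cons, PySem.Chars.replace.go]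
    by_cases h : c = o
    · simp [h, List.isPrefixOf, ih, pvSubst]
    · simp [List.isPrefixOf, Ne.symm h, h, ih, pvSubst]

theorem pv_replace_single (s : List Char) (o : Char) (new : List Char) :
    PySem.Chars.replace s [o] new = s.flatMap (pvSubst o new) := by
  rw [PySem.Chars.replace]
  simp [pv_go_single]

-- the per-character effect of running all nine substitutions equals B's per-character emit
theorem pv_char_eq (c : Char) :
    ((((((((([c].flatMap (pvSubst '#' ['\\', '#'])).flatMap (pvSubst '*' ['\\', '*'])).flatMap
      (pvSubst '_' ['\\', '_'])).flatMap (pvSubst '[' ['\\', '['])).flatMap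
      (pvSubst ']' ['\\', ']'])).flatMap (pvSubst '(' ['\\', '('])).flatMap
      (pvSubst ')' ['\\', ')'])).flatMap (pvSubst '>' ['\\', '>'])).flatMap
      (pvSubst '-' ['\\', '-'])) = (if pvIsEsc c then ['\\', c] else [c]) := by
  by_cases h1 : c = '#'; · subst h1; decide
  by_cases h2 : c = '*'; · subst h2; decide
  by_cases h3 : c = '_'; · subst h3; decide
  by_cases h4 : c = '['; · subst h4; decide
  by_cases h5 : c = ']'; · subst h5; decide
  by_cases h6 : c = '('; · subst h6; decide
  by_cases h7 : c = ')'; · subst h7; decide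
  by_cases h8 : c = '>'; · subst h8; decide
  by_cases h9 : c = '-'; · subst h9; decide
  have hesc : pvIsEsc c = false := by
    simp [pvIsEsc, PySem.Set.mem_ofList, h1, h2, h3, h4, h5, h6, h7, h8, h9]
  simp only [pvSubst, List.flatMap_singleton, hesc, if_false, Bool.false_eq_true,
    if_neg h1, if_neg h2, if_neg h3, if_neg h4, if_neg h5, if_neg h6, if_neg h7, if_neg h8, if_neg h9]

theorem pv_escA_flatMap (line : List Char) :
    pvEscLineA line = line.flatMap (fun c => if pvIsEsc c then ['\\', c] else [c]) := by
  unfold pvEscLineA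
  simp only [pv_replace_single, List.flatMap_assoc]
  apply List.flatMap_congr
  intro c _
  simpa [List.flatMap_singleton, List.flatMap_assoc] using pv_char_eq c

-- splitOn.go with separator ['\n'] computes pvSplit
theorem pv_splitOn_go (fuel : Nat) : ∀ (l cur acc : List Char) (accl : List (List Char)),
    l.length ≤ fuel →
    PySem.Chars.splitOn.go ['\n'] fuel l cur accl = accl.reverse ++ pvSplit cur.reverse l := by
  induction fuel with
  | zero =>
    intro l cur acc accl hl
    have : l = [] := List.eq_nil_of_length_eq_zero (Nat.le_zero.mp hl)
    subst this
    simp [PySem.Chars.splitOn.go, pvSplit]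
  | succ n ih =>
    intro l cur acc accl hl
    cases l with
    | nil => simp [PySem.Chars.splitOn.go, pvSplit]
    | cons c t =>
      rw [PySem.Chars.splitOn.go]
      by_cases hc : c = '\n'
      · subst hc
        have hpre : (['\n'].isPrefixOf ('\n' :: t)) = true := by simp [List.isPrefixOf]
        simp only [hpre, if_pos]
        rw [show List.drop (['\n'] : List Char).length ('\n' :: t) = t from rfl]
        rw [ih t [] acc (cur.reverse :: accl) (by simpa using Nat.le_of_succ_le_succ hl)]
        simp [pvSplit]
      · have hp : (['\n'].isPrefixOf (c :: t)) = false := by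
          simp [List.isPrefixOf, Ne.symm hc]
        simp only [hp, Bool.false_eq_true, if_false]
        rw [ih t (c :: cur) acc accl (by simpa using Nat.le_of_succ_le_succ hl)]
        simp [pvSplit, hc]

theorem pv_splitOn_eq (l : List Char) :
    PySem.Chars.splitOn l ['\n'] = pvSplit [] l := by
  rw [PySem.Chars.splitOn]
  simpa using pv_splitOn_go (l.length + 1) l [] [] [] (Nat.le_succ _)

-- pvSplit is head line :: split of the remainder
theorem pv_pvSplit_eq : ∀ (l pre : List Char),
    pvSplit pre l = (pre ++ l.takeWhile (· ≠ '\n')) ::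
      (match l.dropWhile (· ≠ '\n') with
       | [] => ([] : List (List Char))
       | _ :: t => pvSplit [] t) := by
  intro l
  induction l with
  | nil => intro pre; simp [pvSplit]
  | cons c t ih =>
    intro pre
    by_cases hc : c = '\n'
    · subst hc; simp [pvSplit, List.takeWhile, List.dropWhile]
    · simp [pvSplit, hc, List.takeWhile, List.dropWhile, ih (pre ++ [c])]

-- rstrip keeps a non-space head
theorem pv_rstrip_cons (c : Char) (x : List Char) (h : PySem.Chars.isspace c = false) :
    PySem.Chars.rstrip (c :: x) = c :: PySem.Chars.rstrip x := by
  rw [PySem.Chars.rstrip, PySem.Chars.rstrip, List.reverse_cons, List.dropWhile_append]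
  split_ifs with he
  · have : List.dropWhile PySem.Chars.isspace x.reverse = [] := by
      simpa [List.isEmpty_iff] using he
    simp [this, List.dropWhile, h]
  · simp

-- the lookahead loop decides exactly A's guard on the current line
theorem pv_isComment_eq : ∀ (l : List Char),
    pvIsComment l =
      PySem.Chars.startswith (PySem.Chars.strip (l.takeWhile (· ≠ '\n'))) ['#'] := by
  intro l
  induction l with
  | nil => simp [pvIsComment, PySem.Chars.strip, PySem.Chars.lstrip, PySem.Chars.rstrip,
      PySem.Chars.startswith]
  | cons c t ih =>
    by_cases hc : c = '\n'
    · subst hc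
      simp [pvIsComment, List.takeWhile, PySem.Chars.strip, PySem.Chars.lstrip,
        PySem.Chars.rstrip, PySem.Chars.startswith, PySem.Chars.isspace]
    · by_cases hs : PySem.Chars.isspace c
      · simp only [pvIsComment, hc, hs, ne_eq, not_false_iff, true_and, if_true, ih]
        simp [List.takeWhile, hc, PySem.Chars.strip, PySem.Chars.lstrip, hs]
      · simp only [pvIsComment, hc, hs, ne_eq, not_false_iff, true_and, and_false, if_false]
        rw [List.takeWhile_cons_of_pos (by simpa using hc)]
        rw [PySem.Chars.strip, PySem.Chars.lstrip,
          List.dropWhile_cons_of_neg (by simpa using hs),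
          pv_rstrip_cons c _ (by simpa using hs)]
        simp only [PySem.Chars.startswith, List.isPrefixOf, Bool.and_true]
        by_cases hq : c = '#'
        · simp [hq]
        · simp [hq, Ne.symm hq]

-- escaping a line char-by-char equals A's per-line transform
theorem pv_lineA_flatMap (comment : Bool) (line : List Char)
    (h : comment = PySem.Chars.startswith (PySem.Chars.strip line) ['#']) :
    line.flatMap (fun c => if comment && pvIsEsc c then ['\\', c] else [c]) = pvLineA line := by
  unfold pvLineA
  cases hcb : comment with
  | true =>
    rw [← h, hcb]
    simp [pv_escA_flatMap]
  | false =>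
    rw [← h, hcb]
    simp

-- the emit loop processes exactly the current line, then hands back to pvGoB
theorem pv_emit_eq : ∀ (l : List Char) (comment : Bool),
    pvEmitB comment l =
      (l.takeWhile (· ≠ '\n')).flatMap (fun c => if comment && pvIsEsc c then ['\\', c] else [c])
        ++ (match l.dropWhile (· ≠ '\n') with
            | [] => ([] : List Char)
            | _ :: t => '\n' :: pvGoB t) := by
  intro l
  induction l with
  | nil => intro comment; simp [pvEmitB]
  | cons c t ih =>
    intro comment
    by_cases hc : c = '\n'
    · subst hc; simp [pvEmitB, List.takeWhile, List.dropWhile]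
    · simp only [pvEmitB, if_neg hc]
      rw [ih comment]
      simp [List.takeWhile_cons, List.dropWhile_cons, hc]

-- join of ['\n'] over a cons
theorem pv_join_cons (a : List Char) (rest : List (List Char)) (hr : rest ≠ []) :
    PySem.Chars.join ['\n'] (a :: rest) = a ++ '\n' :: PySem.Chars.join ['\n'] rest := by
  rcases rest with _ | ⟨b, r⟩
  · exact absurd rfl hr
  · simp [PySem.Chars.join, List.intercalate, List.intersperse]

-- pvSplit never returns []
theorem pv_pvSplit_ne_nil (l pre : List Char) : pvSplit pre l ≠ [] := by
  rw [pv_pvSplit_eq]; simp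

-- MAIN: the streaming pass equals split-map-join
theorem pv_main (n : Nat) : ∀ (l : List Char), l.length ≤ n →
    pvGoB l = PySem.Chars.join ['\n'] ((pvSplit [] l).map pvLineA) := by
  induction n with
  | zero =>
    intro l hl
    have : l = [] := List.eq_nil_of_length_eq_zero (Nat.le_zero.mp hl)
    subst this
    simp [pvGoB, pvSplit, PySem.Chars.join, List.intercalate, pvLineA,
      PySem.Chars.strip, PySem.Chars.lstrip, PySem.Chars.rstrip, PySem.Chars.startswith,
      List.isPrefixOf]
  | succ n ih =>
    intro l hl
    cases l with
    | nil =>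
      simp [pvGoB, pvSplit, PySem.Chars.join, List.intercalate, pvLineA,
        PySem.Chars.strip, PySem.Chars.lstrip, PySem.Chars.rstrip, PySem.Chars.startswith,
        List.isPrefixOf]
    | cons c t =>
      rw [show pvGoB (c :: t) = pvEmitB (pvIsComment (c :: t)) (c :: t) from by
        simp [pvGoB]]
      rw [pv_emit_eq, pv_pvSplit_eq]
      set L := (c :: t).takeWhile (· ≠ '\n') with hL
      rw [pv_lineA_flatMap (pvIsComment (c :: t)) L (by rw [hL]; exact pv_isComment_eq (c :: t))]
      rcases hd : (c :: t).dropWhile (· ≠ '\n') with _ | ⟨d, r⟩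
      · simp [PySem.Chars.join, List.intercalate]
      · dsimp only
        rw [List.map_cons,
          pv_join_cons _ _ (by simp [pv_pvSplit_ne_nil])]
        have hr : r.length ≤ n := by
          have h1 : ((c :: t).dropWhile (· ≠ '\n')).length ≤ (c :: t).length :=
            (List.dropWhile_sublist _).length_le
          rw [hd] at h1
          simp only [List.length_cons] at h1 hl
          omega
        rw [ih r hr]
        simp [List.append_assoc]

-- ===== VERDICT (by name: the statement is the Claim_ definition above) =====
theorem escape_markdown_characters_in_python_code_spec : Claim_equal_escape_markdown_characters_in_python_code := by
  intro code _
  unfold Spec_escape_markdown_characters_in_python_code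
  simp only [escape_markdown_characters_in_python_code, escape_markdown_characters_in_python_code_alt]
  rw [PySem.List.foldl_append_singleton_eq_map
    (f := fun line => if PySem.Chars.startswith (PySem.Chars.strip line) ['#'] = true
                      then pvEscLineA line else line)]
  rw [pv_splitOn_eq, pv_main code.toList.length code.toList (Nat.le_refl _)]
  rfl
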